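-- pv_equiv track=rewrite | github.com/bullseye2030/CS1821-G16 | map.py | mirror_list
-- ===== SOURCE A (Python) =====
-- def mirror_list(input_list):
--     list_length = len(input_list)
--     temp = reversed(input_list[:list_length // 2])
--     i = list_length // 2 if list_length % 2 == 0 else list_length // 2 + 1
--     for num in temp:
--         input_list[i] = num
--         i += 1
--     return input_list
-- ===== SOURCE B (Python) =====
-- def mirror_list(input_list):
--     n = len(input_list)
--     for j in range(n // 2):
--         input_list[n - 1 - j] = input_list[j]
--     return input_list
-- ===== Notes on version B (the rewrite author's own statement) =====
-- stated objective: simpler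
-- what changed: B drops A's materialized reversed half-copy and separate write cursor: it writes input_list[n-1-j] = input_list[j] back-to-front in one index loop, reading the untouched first half directly.
import Mathlib
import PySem

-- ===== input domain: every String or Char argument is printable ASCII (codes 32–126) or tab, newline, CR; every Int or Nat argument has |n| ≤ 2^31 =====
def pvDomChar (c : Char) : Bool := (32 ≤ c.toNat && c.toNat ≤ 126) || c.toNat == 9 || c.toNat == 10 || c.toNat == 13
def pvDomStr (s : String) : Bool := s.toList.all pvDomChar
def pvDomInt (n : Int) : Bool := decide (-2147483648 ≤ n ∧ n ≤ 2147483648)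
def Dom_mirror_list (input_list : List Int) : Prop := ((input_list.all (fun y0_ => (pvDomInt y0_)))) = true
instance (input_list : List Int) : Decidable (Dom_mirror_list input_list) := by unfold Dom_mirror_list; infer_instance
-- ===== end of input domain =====

-- B replaces A's reversed half-copy + write cursor by a single index loop writing
-- input_list[n-1-j] = input_list[j]; equivalence of the RETURN value is proved (both
-- Pythons mutate the argument in place and return the same object).

-- ===== PORT A =====
-- A: temp = reversed(input_list[:n//2]); i = n//2 (even) else n//2+1; for num in temp: l[i]=num; i+=1.
-- slice l[:n//2] with a nonnegative bound is take; every write index i is in range, so List.set is exact.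
def mirror_list (input_list : List Int) : List Int :=
  let list_length := input_list.length
  let temp := (input_list.take (list_length / 2)).reverse
  let i := if list_length % 2 == 0 then list_length / 2 else list_length / 2 + 1
  (temp.foldl (fun (st : List Int × Nat) num => (st.1.set st.2 num, st.2 + 1)) (input_list, i)).1

-- ===== PORT B =====
-- B: for j in range(n//2): input_list[n-1-j] = input_list[j]; both indices are always in range,
-- so List.set / getD are exact.
def mirror_list_alt (input_list : List Int) : List Int :=
  let n := input_list.length
  (List.range (n / 2)).foldl (fun acc j => acc.set (n - 1 - j) (acc.getD j 0)) input_list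

-- ===== PRECONDITION & SPEC =====
def Spec_mirror_list (input_list : List Int) (out : List Int) : Prop := out = mirror_list_alt input_list
instance (input_list : List Int) (out : List Int) : Decidable (Spec_mirror_list input_list out) := by unfold Spec_mirror_list; infer_instance

-- ===== CLAIM (what is proved, stated in full; the proofs are below) =====
def Claim_equal_mirror_list : Prop := ∀ (input_list : List Int), Dom_mirror_list input_list → Spec_mirror_list input_list (mirror_list input_list)

-- ===== LEMMAS AND PROOFS =====

-- A's loop writes xs at consecutive positions i, i+1, … of st.
lemma foldl_set_consec (xs : List Int) : ∀ (st : List Int) (i : Nat), i + xs.length ≤ st.length →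
    (xs.foldl (fun (st : List Int × Nat) num => (st.1.set st.2 num, st.2 + 1)) (st, i)).1
      = st.take i ++ xs ++ st.drop (i + xs.length) := by
  induction xs with
  | nil => intro st i h; simp
  | cons a xs ih =>
    intro st i h
    simp only [List.length_cons] at h
    have hi : i < st.length := by omega
    have hlen : (st.take i).length = i := List.length_take_of_le (by omega)
    simp only [List.foldl_cons]
    rw [ih (st.set i a) (i + 1) (by simp; omega)]
    have hset : st.set i a = st.take i ++ a :: st.drop (i + 1) := by
      rw [List.set_eq_take_append_cons_drop, if_pos hi]
    rw [hset, List.take_append, List.drop_append, hlen]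
    have e2 : List.take (i + 1) (st.take i) = st.take i := by
      rw [List.take_take]; congr 1; omega
    have e3 : List.drop (i + 1 + xs.length) (st.take i) = [] :=
      List.drop_eq_nil_of_le (by rw [hlen]; omega)
    have e1 : i + 1 - i = 1 := by omega
    have e4 : i + 1 + xs.length - i = xs.length + 1 := by omega
    rw [e1, e2, e3, e4]
    simp
    omega

-- B's loop invariant: after j = 0 … k-1 the list is l with its last k elements overwritten
-- by the reversed first k elements.
lemma alt_inv (l : List Int) : ∀ k, k ≤ l.length / 2 →
    (List.range k).foldl (fun acc j => acc.set (l.length - 1 - j) (acc.getD j 0)) l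
      = l.take (l.length - k) ++ (l.take k).reverse := by
  intro k
  induction k with
  | zero => intro _; simp
  | succ k ih =>
    intro hk
    rw [List.range_succ, List.foldl_append, ih (by omega)]
    have hk2 : 2 * (k + 1) ≤ l.length := by
      have := Nat.div_mul_le_self l.length 2; omega
    have htk : (l.take (l.length - k)).length = l.length - k := by simp
    simp only [List.foldl_cons, List.foldl_nil]
    rw [List.getD_append _ _ _ _ (by rw [htk]; omega)]
    have hget : (l.take (l.length - k)).getD k 0 = l.getD k 0 := by
      unfold List.getD
      rw [List.getElem?_take_of_lt (by omega)]
    rw [hget]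
    rw [List.set_append_left _ _ (by rw [htk]; omega)]
    rw [List.set_eq_take_append_cons_drop,
        if_pos (show l.length - 1 - k < (l.take (l.length - k)).length by rw [htk]; omega)]
    rw [List.take_take]
    have h1 : min (l.length - 1 - k) (l.length - k) = l.length - 1 - k := by omega
    rw [h1]
    have h2 : l.length - 1 - k = l.length - (k + 1) := by omega
    have h3 : (l.take (l.length - k)).drop (l.length - 1 - k + 1) = [] := by
      apply List.drop_eq_nil_of_le; rw [htk]; omega
    rw [h3]
    have h4 : (l.take (k + 1)).reverse = l.getD k 0 :: (l.take k).reverse := by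
      have : l.take (k + 1) = l.take k ++ [l.getD k 0] := by
        have hkl : k < l.length := by omega
        rw [List.take_add_one]
        congr 1
        simp [List.getElem?_eq_getElem hkl, List.getD, Option.toList]
      rw [this, List.reverse_append]; simp
    rw [h2, h4]
    simp

-- common closed form
lemma mirror_closed (l : List Int) :
    mirror_list l = l.take (l.length - l.length / 2) ++ (l.take (l.length / 2)).reverse := by
  unfold mirror_list
  dsimp only
  set n := l.length with hn
  have hi : (if n % 2 == 0 then n / 2 else n / 2 + 1) = n - n / 2 := by
    rcases Nat.mod_two_eq_zero_or_one n with h | h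
    · simp only [h]; simp; omega
    · simp only [h]; simp; omega
  rw [hi]
  rw [foldl_set_consec _ l (n - n / 2) (by simp [hn]; omega)]
  have : n - n / 2 + (l.take (n / 2)).reverse.length = n := by simp [hn]; omega
  rw [this]
  simp [hn]

lemma alt_closed (l : List Int) :
    mirror_list_alt l = l.take (l.length - l.length / 2) ++ (l.take (l.length / 2)).reverse := by
  unfold mirror_list_alt
  exact alt_inv l (l.length / 2) (le_refl _)

-- ===== VERDICT (by name: the statement is the Claim_ definition above) =====
theorem mirror_list_spec : Claim_equal_mirror_list := by
  intro l _
  unfold Spec_mirror_list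
  rw [mirror_closed, alt_closed]
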